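-- pv_equiv track=rewrite | github.com/Melch1o/3inRowMatchingGame | MidtermProject.py | delete_matches
-- ===== SOURCE A (Python) =====
-- def delete_matches(board):
--     delete = []
--     for y in range(len(board)):
--         streak = 0
--         for x in range(1, len(board[y])):
--             if board[y][x] == board[y][x - 1]:
--                 streak += 1
--             else:
--                 streak = 0
--
--             if streak == 2:
--                 delete += [[x - 2, y]]
--                 delete += [[x - 1, y]]
--                 delete += [[x, y]]
--             elif streak > 2:
--                 delete += [[x, y]]
--
--
--     for x in range(len(board)):
--         streak = 0
--         for y in range(1, len(board[x])):
--             if board[y][x] == board[y - 1][x]: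
--                 streak += 1
--             else:
--                 streak = 0
--
--             if streak == 2:
--                 delete += [[x, y - 2]]
--                 delete += [[x, y - 1]]
--                 delete += [[x, y]]
--             elif streak > 2:
--                 delete += [[x, y]]
--
--     for i in range(len(delete)):
--         board[delete[i][1]][delete[i][0]] = 0
--
--     return (board, len(delete) * 5)
-- ===== SOURCE B (Python) =====
-- def _runs(seq):
--     """Maximal runs of equal values in seq, as (start, length) pairs, one pass."""
--     if not seq:
--         return []
--     runs = []
--     cur, start, length = seq[0], 0, 1
--     for w in seq[1:]:
--         if w == cur:
--             length += 1
--         else: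
--             runs.append((start, length))
--             cur, start, length = w, start + length, 1
--     runs.append((start, length))
--     return runs
--
--
-- def delete_matches(board):
--     delete = []
--     for y, row in enumerate(board):
--         for start, cnt in _runs(row):
--             if cnt >= 3:
--                 for x in range(start, start + cnt):
--                     delete.append([x, y])
--     for x in range(len(board)):
--         n = len(board[x])
--         if n >= 3:
--             col = [board[y][x] for y in range(n)]
--             for start, cnt in _runs(col):
--                 if cnt >= 3:
--                     for y in range(start, start + cnt):
--                         delete.append([x, y])
--     for cx, cy in delete:
--         board[cy][cx] = 0
--     return (board, len(delete) * 5)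
-- ===== Notes on version B (the rewrite author's own statement) =====
-- stated objective: alternative
-- what changed: Replaces A's incremental streak counter (emitting three cells when the streak hits 2 and one per further step) with explicit maximal-run grouping: each row/column is decomposed into (start,length) runs once and every run of length >= 3 contributes all its cells; columns shorter than 3 are skipped entirely.
import Mathlib
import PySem

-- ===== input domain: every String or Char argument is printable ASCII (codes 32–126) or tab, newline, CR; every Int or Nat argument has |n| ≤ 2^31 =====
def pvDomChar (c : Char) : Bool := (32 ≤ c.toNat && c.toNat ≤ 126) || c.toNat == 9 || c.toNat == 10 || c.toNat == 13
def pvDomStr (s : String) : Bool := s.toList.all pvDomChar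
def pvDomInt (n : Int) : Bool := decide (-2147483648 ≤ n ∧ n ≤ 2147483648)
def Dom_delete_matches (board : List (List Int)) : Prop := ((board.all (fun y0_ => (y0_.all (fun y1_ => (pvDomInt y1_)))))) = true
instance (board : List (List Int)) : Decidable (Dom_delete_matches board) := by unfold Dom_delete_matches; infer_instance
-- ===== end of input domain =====

-- B replaces A's incremental streak counter with maximal-run grouping (same return value; both
-- Pythons also mutate `board` in place identically — the ports return the mutated board).

-- ===== PORT A =====
def delete_matches (board : List (List Int)) : List (List Int) × Int :=
  let d1 := (List.range board.length).foldl (fun delete y =>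
    ((List.range' 1 ((board.getD y []).length - 1)).foldl
      (fun (p : List (Nat × Nat) × Nat) x =>
        let streak := if (board.getD y []).getD x 0 == (board.getD y []).getD (x-1) 0 then p.2 + 1 else 0
        let d := if streak == 2 then p.1 ++ [(x-2, y), (x-1, y), (x, y)]
                 else if streak > 2 then p.1 ++ [(x, y)] else p.1
        (d, streak)) (delete, 0)).1) []
  let d2 := (List.range board.length).foldl (fun delete x =>
    ((List.range' 1 ((board.getD x []).length - 1)).foldl
      (fun (p : List (Nat × Nat) × Nat) y =>
        let streak := if (board.getD y []).getD x 0 == (board.getD (y-1) []).getD x 0 then p.2 + 1 else 0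
        let d := if streak == 2 then p.1 ++ [(x, y-2), (x, y-1), (x, y)]
                 else if streak > 2 then p.1 ++ [(x, y)] else p.1
        (d, streak)) (delete, 0)).1) d1
  let nb := d2.foldl (fun b c => b.set c.2 ((b.getD c.2 []).set c.1 0)) board
  (nb, (d2.length : Int) * 5)

-- ===== PORT B =====
-- `_runs` of Source B: maximal runs of equal values as (start, length), one pass carrying the
-- current run (cur, start, length); the trailing append is the base case.
def pvRunsGo (cur : Int) (start length : Nat) : List Int → List (Nat × Nat)
  | [] => [(start, length)]
  | w :: rest =>
    if w == cur then pvRunsGo cur start (length + 1) rest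
    else (start, length) :: pvRunsGo w (start + length) 1 rest

def pvRuns : List Int → Nat → List (Nat × Nat)
  | [], _ => []
  | v :: rest, i => pvRunsGo v i 1 rest

def delete_matches_alt (board : List (List Int)) : List (List Int) × Int :=
  let d1 := board.zipIdx.foldl (fun delete p =>
    (pvRuns p.1 0).foldl (fun d r =>
      if 3 ≤ r.2 then d ++ (List.range' r.1 r.2).map (fun x => (x, p.2)) else d) delete) []
  let d2 := (List.range board.length).foldl (fun delete x =>
    let n := (board.getD x []).length
    if 3 ≤ n then
      let col := (List.range n).map (fun y => (board.getD y []).getD x 0)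
      (pvRuns col 0).foldl (fun d r =>
        if 3 ≤ r.2 then d ++ (List.range' r.1 r.2).map (fun y => (x, y)) else d) delete
    else delete) d1
  let nb := d2.foldl (fun b c => b.set c.2 ((b.getD c.2 []).set c.1 0)) board
  (nb, (d2.length : Int) * 5)

-- ===== PRECONDITION & SPEC =====
-- Pre_ excludes exactly the inputs on which Python A raises IndexError: the vertical pass scans,
-- for each x < len(board), indices y in [0, len(board[x])-1] (when len(board[x]) ≥ 2) and needs
-- row y to exist and to be longer than x.
def Pre_delete_matches (board : List (List Int)) : Prop :=
  ∀ x < board.length, 2 ≤ (board.getD x []).length →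
    ∀ y < (board.getD x []).length, y < board.length ∧ x < (board.getD y []).length
instance (board : List (List Int)) : Decidable (Pre_delete_matches board) := by
  unfold Pre_delete_matches; infer_instance
def pvWitness_delete_matches : List (List Int) := [[1, 1, 1], [2, 3, 4], [5, 6, 7]]

def Spec_delete_matches (board : List (List Int)) (out : List (List Int) × Int) : Prop := out = delete_matches_alt board
instance (board : List (List Int)) (out : List (List Int) × Int) : Decidable (Spec_delete_matches board out) := by unfold Spec_delete_matches; infer_instance

-- ===== CLAIM (what is proved, stated in full; the proofs are below) =====
def Claim_equal_delete_matches : Prop := ∀ (board : List (List Int)), Dom_delete_matches board → Pre_delete_matches board → Spec_delete_matches board (delete_matches board)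

-- ===== LEMMAS AND PROOFS =====

-- cells A emits while the streak climbs through an all-equal block (k = incoming streak)
def pvEmit (mk : Nat → Nat × Nat) : Nat → Nat → Nat → List (Nat × Nat)
  | _, _, 0 => []
  | x, k, m+1 =>
    (if k + 1 == 2 then [mk (x-2), mk (x-1), mk x] else if k + 1 > 2 then [mk x] else [])
      ++ pvEmit mk (x+1) (k+1) m

-- A's inner streak loop, recursively over the remaining sequence
def pvScan (mk : Nat → Nat × Nat) : Int → Nat → Nat → List Int → List (Nat × Nat)
  | _, _, _, [] => []
  | prev, k, x, v :: rest =>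
    let s := if v == prev then k + 1 else 0
    (if s == 2 then [mk (x-2), mk (x-1), mk x] else if s > 2 then [mk x] else [])
      ++ pvScan mk v s (x+1) rest

-- B's contribution of one sequence
def pvBLine (mk : Nat → Nat × Nat) (seq : List Int) (s : Nat) : List (Nat × Nat) :=
  (pvRuns seq s).flatMap (fun r => if 3 ≤ r.2 then (List.range' r.1 r.2).map mk else [])

lemma pv_fold_scan (mk : Nat → Nat × Nat) (seq : List Int) :
    ∀ (tail : List Int) (x k : Nat) (acc : List (Nat × Nat)),
    seq.drop x = tail → 1 ≤ x →
    ((List.range' x tail.length).foldl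
      (fun (p : List (Nat × Nat) × Nat) i =>
        let s := if seq.getD i 0 == seq.getD (i-1) 0 then p.2 + 1 else 0
        let d := if s == 2 then p.1 ++ [mk (i-2), mk (i-1), mk i]
                 else if s > 2 then p.1 ++ [mk i] else p.1
        (d, s)) (acc, k)).1
      = acc ++ pvScan mk (seq.getD (x-1) 0) k x tail := by
  intro tail
  induction tail with
  | nil => intro x k acc h hx; simp [pvScan]
  | cons v ts ih =>
    intro x k acc h hx
    have hv : seq.getD x 0 = v := by
      have h0 : seq[x]? = some v := by
        have h1 : (seq.drop x)[0]? = seq[x + 0]? := List.getElem?_drop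
        rw [h] at h1; simpa using h1.symm
      simp [List.getD_eq_getElem?_getD, h0]
    have hd : seq.drop (x+1) = ts := by
      rw [← List.tail_drop, h]; rfl
    simp only [List.length_cons, List.range'_succ, List.foldl_cons]
    rw [ih (x+1) _ _ hd (by omega)]
    have hx1 : x + 1 - 1 = x := by omega
    simp only [hx1, hv, pvScan]
    split_ifs <;> simp

lemma pv_climb (mk : Nat → Nat × Nat) (a : Int) :
    ∀ (t rest : List Int) (x k : Nat), (∀ w ∈ t, (w == a) = true) →
    pvScan mk a k x (t ++ rest)
      = pvEmit mk x k t.length ++ pvScan mk a (k + t.length) (x + t.length) rest := by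
  intro t
  induction t with
  | nil => intro rest x k h; simp [pvEmit]
  | cons w t' ih =>
    intro rest x k h
    have hw : (w == a) = true := h w (by simp)
    have hwa : w = a := eq_of_beq hw
    simp only [List.cons_append, pvScan, hw, if_true]
    rw [hwa, ih rest (x+1) (k+1) (fun u hu => h u (by simp [hu]))]
    simp only [pvEmit, List.length_cons, List.append_assoc]
    have e1 : k + (t'.length + 1) = k + 1 + t'.length := by omega
    have e2 : x + (t'.length + 1) = x + 1 + t'.length := by omega
    rw [e1, e2]

lemma pv_emit_big (mk : Nat → Nat × Nat) :
    ∀ (m x k : Nat), 2 ≤ k → pvEmit mk x k m = (List.range' x m).map mk := by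
  intro m
  induction m with
  | zero => intro x k _; simp [pvEmit]
  | succ m ih =>
    intro x k hk
    have h2 : (k + 1 == 2) = false := by simp; omega
    have h3 : k + 1 > 2 := by omega
    simp only [pvEmit, h2, Bool.false_eq_true, if_false, if_pos h3]
    rw [ih (x+1) (k+1) (by omega)]
    simp [List.range'_succ]

lemma pv_emit_start (mk : Nat → Nat × Nat) (m s : Nat) :
    pvEmit mk (s+1) 0 m = if 3 ≤ m + 1 then (List.range' s (m+1)).map mk else [] := by
  match m with
  | 0 => simp [pvEmit]
  | 1 => simp [pvEmit]
  | (m'+2) =>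
    have hb := pv_emit_big mk m' (s+3) 2 (le_refl 2)
    have h3 : (3:Nat) ≤ m' + 2 + 1 := by omega
    simp only [pvEmit, hb, if_pos h3]
    have e1 : s + 1 + 1 = s + 2 := by omega
    have e2 : s + 2 - 2 = s := by omega
    have e3 : s + 2 - 1 = s + 1 := by omega
    have e4 : s + 2 + 1 = s + 3 := by omega
    simp [e1, e2, e3, e4, List.range'_succ]

lemma pv_drop_takeWhile (p : Int → Bool) :
    ∀ (l : List Int), l.drop (l.takeWhile p).length = l.dropWhile p := by
  intro l
  induction l with
  | nil => rfl
  | cons a l ih =>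
    by_cases h : p a <;> simp [h, ih]

lemma pvRunsGo_spec (a : Int) :
    ∀ (rest : List Int) (i len : Nat),
    pvRunsGo a i len rest
      = (i, len + (rest.takeWhile (fun w => w == a)).length)
        :: pvRuns (rest.drop (rest.takeWhile (fun w => w == a)).length)
             (i + (len + (rest.takeWhile (fun w => w == a)).length)) := by
  intro rest
  induction rest with
  | nil => intro i len; simp [pvRunsGo, pvRuns]
  | cons w r ih =>
    intro i len
    by_cases hw : (w == a) = true
    · simp only [pvRunsGo, hw, if_true, List.takeWhile_cons, List.length_cons,
        List.drop_succ_cons]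
      rw [ih i (len+1)]
      have e1 : len + ((r.takeWhile (fun w => w == a)).length + 1)
          = len + 1 + (r.takeWhile (fun w => w == a)).length := by omega
      rw [e1]
    · have hw' : (w == a) = false := by simpa using hw
      simp [pvRunsGo, hw', pvRuns]

lemma pvRuns_cons (v : Int) (rest : List Int) (i : Nat) :
    pvRuns (v :: rest) i
      = (i, (rest.takeWhile (fun w => w == v)).length + 1)
        :: pvRuns (rest.drop (rest.takeWhile (fun w => w == v)).length)
             (i + ((rest.takeWhile (fun w => w == v)).length + 1)) := by
  show pvRunsGo v i 1 rest = _
  rw [pvRunsGo_spec v rest i 1]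
  have e : 1 + (rest.takeWhile (fun w => w == v)).length
      = (rest.takeWhile (fun w => w == v)).length + 1 := by omega
  rw [e]

lemma pv_scan_bline (mk : Nat → Nat × Nat) :
    ∀ (n : Nat) (tail : List Int), tail.length < n → ∀ (a : Int) (s : Nat),
    pvScan mk a 0 (s+1) tail = pvBLine mk (a :: tail) s := by
  intro n
  induction n with
  | zero => intro tail h; omega
  | succ n ih =>
    intro tail h a s
    have hsplit : tail.takeWhile (fun w => w == a) ++ tail.dropWhile (fun w => w == a) = tail :=
      List.takeWhile_append_dropWhile
    have hdrop : tail.drop (tail.takeWhile (fun w => w == a)).length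
        = tail.dropWhile (fun w => w == a) := pv_drop_takeWhile _ tail
    have hmem : ∀ w ∈ tail.takeWhile (fun w => w == a), (w == a) = true :=
      fun w hw => List.mem_takeWhile_imp (l := tail) (p := fun u => u == a) hw
    have hclimb : pvScan mk a 0 (s+1) tail
        = pvEmit mk (s+1) 0 (tail.takeWhile (fun w => w == a)).length
          ++ pvScan mk a (tail.takeWhile (fun w => w == a)).length
               (s+1+(tail.takeWhile (fun w => w == a)).length)
               (tail.dropWhile (fun w => w == a)) := by
      conv_lhs => rw [← hsplit]
      simpa using pv_climb mk a (tail.takeWhile (fun w => w == a))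
        (tail.dropWhile (fun w => w == a)) (s+1) 0 hmem
    rw [hclimb, pv_emit_start]
    rw [pvBLine, pvRuns_cons, hdrop]
    cases hr : tail.dropWhile (fun w => w == a) with
    | nil => simp [pvScan, pvRuns]
    | cons b r' =>
      have hb : (b == a) = false := by
        have hne : tail.dropWhile (fun w => w == a) ≠ [] := by simp [hr]
        have h2 := List.head_dropWhile_not (fun w => w == a) hne
        simp only [hr, List.head_cons] at h2
        simpa using h2
      have hlt : r'.length < n := by
        have h1 : tail.length = (tail.takeWhile (fun w => w == a)).length
            + (b :: r').length := by
          conv_lhs => rw [← hsplit]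
          rw [hr, List.length_append]
        simp at h1; omega
      have e : s + 1 + (tail.takeWhile (fun w => w == a)).length + 1
          = (s + ((tail.takeWhile (fun w => w == a)).length + 1)) + 1 := by omega
      simp only [pvScan, hb, Bool.false_eq_true, if_false, List.flatMap_cons]
      norm_num
      rw [e, ih r' hlt b (s + ((tail.takeWhile (fun w => w == a)).length + 1))]
      simp [pvBLine]

lemma pv_scan_row (mk : Nat → Nat × Nat) (row : List Int) :
    pvScan mk (row.getD 0 0) 0 1 (row.drop 1) = pvBLine mk row 0 := by
  cases row with
  | nil => simp [pvScan, pvBLine, pvRuns]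
  | cons a t => simpa using pv_scan_bline mk (t.length + 1) t (by omega) a 0

lemma pv_bline_small (mk : Nat → Nat × Nat) (seq : List Int) (s : Nat) (h : seq.length ≤ 2) :
    pvBLine mk seq s = [] := by
  cases seq with
  | nil => simp [pvBLine, pvRuns]
  | cons a t =>
    cases t with
    | nil => simp [pvBLine, pvRuns, pvRunsGo]
    | cons b t2 =>
      cases t2 with
      | nil => by_cases hb : (b == a) = true <;>
          simp [pvBLine, pvRuns, pvRunsGo, hb]
      | cons c t3 => simp at h

-- one row/column contribution: A's streak fold over indices = acc ++ B's run contribution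
lemma pv_rowH (mk : Nat → Nat × Nat) (row : List Int) (acc : List (Nat × Nat)) :
    ((List.range' 1 (row.length - 1)).foldl
      (fun (p : List (Nat × Nat) × Nat) i =>
        let s := if row.getD i 0 == row.getD (i-1) 0 then p.2 + 1 else 0
        let d := if s == 2 then p.1 ++ [mk (i-2), mk (i-1), mk i]
                 else if s > 2 then p.1 ++ [mk i] else p.1
        (d, s)) (acc, 0)).1 = acc ++ pvBLine mk row 0 := by
  have h := pv_fold_scan mk row (row.drop 1) 1 0 acc rfl (le_refl 1)
  rw [List.length_drop] at h
  rw [h, pv_scan_row]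

lemma pv_rowB (mk : Nat → Nat × Nat) (row : List Int) (acc : List (Nat × Nat)) :
    (pvRuns row 0).foldl
      (fun d r => if 3 ≤ r.2 then d ++ (List.range' r.1 r.2).map mk else d) acc
      = acc ++ pvBLine mk row 0 := by
  rw [show (fun (d : List (Nat × Nat)) (r : Nat × Nat) =>
        if 3 ≤ r.2 then d ++ (List.range' r.1 r.2).map mk else d)
      = fun d r => d ++ (if 3 ≤ r.2 then (List.range' r.1 r.2).map mk else [])
    from funext fun d => funext fun r => by split_ifs <;> simp]
  exact PySem.List.foldl_append_eq_flatMap _ _ _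

lemma pv_foldl_congr {α β : Type} (l : List α) {f g : β → α → β} (init : β)
    (h : ∀ acc x, x ∈ l → f acc x = g acc x) : l.foldl f init = l.foldl g init := by
  induction l generalizing init with
  | nil => rfl
  | cons a t ih =>
    rw [List.foldl_cons, List.foldl_cons, h init a (by simp)]
    exact ih _ (fun acc x hx => h acc x (by simp [hx]))

-- a fold that appends a per-element block is the flatMap of the blocks
lemma pv_foldl_app {α : Type} (l : List α) {f : List (Nat × Nat) → α → List (Nat × Nat)}
    {g : α → List (Nat × Nat)} (init : List (Nat × Nat))
    (h : ∀ acc x, x ∈ l → f acc x = acc ++ g x) :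
    l.foldl f init = init ++ l.flatMap g := by
  induction l generalizing init with
  | nil => simp
  | cons a t ih =>
    rw [List.foldl_cons, h init a (by simp), ih _ (fun acc x hx => h acc x (by simp [hx]))]
    simp

lemma pv_zipIdx_flatMap (G : List Int → Nat → List (Nat × Nat)) :
    ∀ (l : List (List Int)) (k : Nat),
    (l.zipIdx k).flatMap (fun p => G p.1 p.2)
      = (List.range l.length).flatMap (fun i => G (l.getD i []) (k + i)) := by
  intro l
  induction l with
  | nil => intro k; simp
  | cons a t ih =>
    intro k
    rw [List.zipIdx_cons, List.flatMap_cons, ih (k+1)]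
    simp only [List.length_cons, List.range_succ_eq_map, List.flatMap_cons, List.flatMap_map,
      List.getD_cons_zero, List.getD_cons_succ, Function.comp]
    have : (fun (i : Nat) => G (t.getD i []) (k + 1 + i))
        = (fun (i : Nat) => G (t.getD i []) (k + i.succ)) := by
      funext i; congr 1; omega
    rw [this]
    simp

-- the virtual column A scans equals the column list B builds
lemma pv_rowV (board : List (List Int)) (x : Nat) (acc : List (Nat × Nat)) :
    ((List.range' 1 ((board.getD x []).length - 1)).foldl
      (fun (p : List (Nat × Nat) × Nat) y =>
        let s := if (board.getD y []).getD x 0 == (board.getD (y-1) []).getD x 0 then p.2 + 1 else 0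
        let d := if s == 2 then p.1 ++ [(x, y-2), (x, y-1), (x, y)]
                 else if s > 2 then p.1 ++ [(x, y)] else p.1
        (d, s)) (acc, 0)).1
    = acc ++ pvBLine (fun j => (x, j))
        ((List.range (board.getD x []).length).map (fun y => (board.getD y []).getD x 0)) 0 := by
  have hget : ∀ i, i < (board.getD x []).length →
      ((List.range (board.getD x []).length).map
        (fun y => (board.getD y []).getD x 0)).getD i 0 = (board.getD i []).getD x 0 := by
    intro i hi
    rw [List.getD_eq_getElem?_getD, List.getElem?_map, List.getElem?_range hi]
    rfl
  have hstep : ∀ (p : List (Nat × Nat) × Nat) (i : Nat),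
      i ∈ List.range' 1 ((board.getD x []).length - 1) →
      (let s := if (board.getD i []).getD x 0 == (board.getD (i-1) []).getD x 0 then p.2 + 1 else 0
       let d := if s == 2 then p.1 ++ [(x, i-2), (x, i-1), (x, i)]
                else if s > 2 then p.1 ++ [(x, i)] else p.1
       ((d, s) : List (Nat × Nat) × Nat))
      = (let s := if ((List.range (board.getD x []).length).map
            (fun y => (board.getD y []).getD x 0)).getD i 0
            == ((List.range (board.getD x []).length).map
            (fun y => (board.getD y []).getD x 0)).getD (i-1) 0 then p.2 + 1 else 0
         let d := if s == 2 then p.1 ++ [(x, i-2), (x, i-1), (x, i)]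
                  else if s > 2 then p.1 ++ [(x, i)] else p.1
         (d, s)) := by
    intro p i hi
    have h1 := List.mem_range'_1.mp hi
    have hiL : i < (board.getD x []).length := by omega
    have hi1 : i - 1 < (board.getD x []).length := by omega
    simp only [hget i hiL, hget (i-1) hi1]
  rw [pv_foldl_congr (List.range' 1 ((board.getD x []).length - 1)) (acc, 0) hstep]
  have h := pv_rowH (fun j => (x, j))
    ((List.range (board.getD x []).length).map (fun y => (board.getD y []).getD x 0)) acc
  rw [List.length_map, List.length_range] at h
  exact h

-- full delete list, both passes
def pvDel (board : List (List Int)) : List (Nat × Nat) :=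
  (List.range board.length).flatMap (fun y => pvBLine (fun i => (i, y)) (board.getD y []) 0)
  ++ (List.range board.length).flatMap (fun x =>
      pvBLine (fun j => (x, j))
        ((List.range (board.getD x []).length).map (fun y => (board.getD y []).getD x 0)) 0)

lemma pv_A_eq (board : List (List Int)) :
    delete_matches board
      = ((pvDel board).foldl (fun b c => b.set c.2 ((b.getD c.2 []).set c.1 0)) board,
         ((pvDel board).length : Int) * 5) := by
  have h1 : ∀ (acc : List (Nat × Nat)) (y : Nat), y ∈ List.range board.length →
      ((List.range' 1 ((board.getD y []).length - 1)).foldl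
        (fun (p : List (Nat × Nat) × Nat) x =>
          let streak := if (board.getD y []).getD x 0 == (board.getD y []).getD (x-1) 0 then p.2 + 1 else 0
          let d := if streak == 2 then p.1 ++ [(x-2, y), (x-1, y), (x, y)]
                   else if streak > 2 then p.1 ++ [(x, y)] else p.1
          (d, streak)) (acc, 0)).1
      = acc ++ pvBLine (fun i => (i, y)) (board.getD y []) 0 :=
    fun acc y _ => pv_rowH (fun i => (i, y)) (board.getD y []) acc
  have h2 : ∀ (acc : List (Nat × Nat)) (x : Nat), x ∈ List.range board.length →
      ((List.range' 1 ((board.getD x []).length - 1)).foldl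
        (fun (p : List (Nat × Nat) × Nat) y =>
          let streak := if (board.getD y []).getD x 0 == (board.getD (y-1) []).getD x 0 then p.2 + 1 else 0
          let d := if streak == 2 then p.1 ++ [(x, y-2), (x, y-1), (x, y)]
                   else if streak > 2 then p.1 ++ [(x, y)] else p.1
          (d, streak)) (acc, 0)).1
      = acc ++ pvBLine (fun j => (x, j))
          ((List.range (board.getD x []).length).map (fun y => (board.getD y []).getD x 0)) 0 :=
    fun acc x _ => pv_rowV board x acc
  simp only [delete_matches]
  rw [pv_foldl_app (List.range board.length) [] h1,
    pv_foldl_app (List.range board.length) _ h2]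
  simp [pvDel]

lemma pv_B_eq (board : List (List Int)) :
    delete_matches_alt board
      = ((pvDel board).foldl (fun b c => b.set c.2 ((b.getD c.2 []).set c.1 0)) board,
         ((pvDel board).length : Int) * 5) := by
  have h1 : ∀ (acc : List (Nat × Nat)) (p : List Int × Nat), p ∈ board.zipIdx →
      (pvRuns p.1 0).foldl
        (fun d r => if 3 ≤ r.2 then d ++ (List.range' r.1 r.2).map (fun x => (x, p.2)) else d) acc
      = acc ++ pvBLine (fun i => (i, p.2)) p.1 0 :=
    fun acc p _ => pv_rowB (fun i => (i, p.2)) p.1 acc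
  have h2 : ∀ (acc : List (Nat × Nat)) (x : Nat), x ∈ List.range board.length →
      (if 3 ≤ (board.getD x []).length then
        (pvRuns ((List.range (board.getD x []).length).map
            (fun y => (board.getD y []).getD x 0)) 0).foldl
          (fun d r => if 3 ≤ r.2 then d ++ (List.range' r.1 r.2).map (fun y => (x, y)) else d) acc
       else acc)
      = acc ++ pvBLine (fun j => (x, j))
          ((List.range (board.getD x []).length).map (fun y => (board.getD y []).getD x 0)) 0 := by
    intro acc x _
    by_cases h3 : 3 ≤ (board.getD x []).length
    · rw [if_pos h3]
      exact pv_rowB (fun j => (x, j)) _ acc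
    · rw [if_neg h3, pv_bline_small]
      · simp
      · rw [List.length_map, List.length_range]; omega
  simp only [delete_matches_alt]
  rw [pv_foldl_app board.zipIdx [] h1,
    pv_zipIdx_flatMap (fun row y => pvBLine (fun i => (i, y)) row 0) board 0,
    pv_foldl_app (List.range board.length) _ h2]
  simp [pvDel]

-- ===== VERDICT (by name: the statement is the Claim_ definition above) =====
theorem delete_matches_spec : Claim_equal_delete_matches := by
  intro board _ _
  unfold Spec_delete_matches
  rw [pv_A_eq, pv_B_eq]
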